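-- pv_equiv track=rewrite | github.com/miliar/Code_Jam_Webscraper | Solutions_python/Problem_97/1780.py | calc
-- ===== SOURCE A (Python) =====
-- def calc(case):
-- 	a=int(case[0])
-- 	b=int(case[1])
-- 	num=''
-- 	case=0
-- 	list_a=list()
-- 	list_b=list()
-- 	for i in range(a,b+1):
-- 		num=str(i)
-- 		l=len(num)-1
-- 		for j in range(l,0,-1):
-- 			num=str(i)
-- 			temp=num[j:]
-- 			num=num[:j]
-- 			num=str(temp)+str(num)
-- 			if (int(num)<=b and int(num)>i and int(num)>=a):
-- 				flag=0
-- 				for p,q in zip(list_a,list_b):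
-- 					if ((int(num)==p and i==q) or (i==p and int(num)==q)):
-- 						flag=1
-- 						break
-- 				if flag!=1:
-- 					case=case+1
-- 					list_a.append(int(num))
-- 					list_b.append(i)
--
-- 	return case
-- ===== SOURCE B (Python) =====
-- def calc(case):
--     a = int(case[0])
--     b = int(case[1])
--     pairs = []
--     for i in range(a, b + 1):
--         s = str(i)
--         for j in range(1, len(s)):
--             v = int(s[j:] + s[:j])
--             if i < v <= b:
--                 pairs.append((i, v))
--     sp = sorted(pairs)
--     return len(sp) - sum(1 for x, y in zip(sp, sp[1:]) if x == y)
-- ===== Notes on version B (the rewrite author's own statement) =====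
-- stated objective: alternative
-- what changed: B replaces A's incremental dedup (a global pair list linearly re-scanned for every candidate) by a staged pipeline: one flat pass generating all qualifying (i, rotation) candidate pairs, a single sort, and a closed-form distinct count (length minus equal-adjacent entries).
import Mathlib
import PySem

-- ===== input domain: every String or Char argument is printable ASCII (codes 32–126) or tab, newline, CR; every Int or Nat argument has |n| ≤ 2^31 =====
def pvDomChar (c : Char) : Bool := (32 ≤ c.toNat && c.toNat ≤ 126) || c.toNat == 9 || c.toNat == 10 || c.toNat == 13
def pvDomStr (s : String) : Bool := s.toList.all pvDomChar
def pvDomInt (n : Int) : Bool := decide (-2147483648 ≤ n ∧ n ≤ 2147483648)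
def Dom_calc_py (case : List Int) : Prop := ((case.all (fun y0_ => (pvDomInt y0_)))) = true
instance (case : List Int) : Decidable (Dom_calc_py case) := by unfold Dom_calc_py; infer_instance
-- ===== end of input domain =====

-- B replaces A's incremental dedup (a global pair list re-scanned linearly for every candidate)
-- by a staged pipeline: generate all qualifying (i, rotation) pairs in one flat pass, sort them
-- once, and count the distinct ones by comparing adjacent entries (objective: alternative).

-- ===== PORT A =====
-- one iteration of A's inner rotation loop over j, state = (case, list_a, list_b)
def pvStepA (a b i : Int) (cs : List Char) (st : Int × List Int × List Int) (j : Int) :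
    Int × List Int × List Int :=
  let temp := PySem.List.slice cs (some j) none
  let num0 := PySem.List.slice cs none (some j)
  let num := temp ++ num0
  let m := (PySem.Int.ofChars? num).getD 0
  if m ≤ b ∧ i < m ∧ a ≤ m then
    let flag : Int :=
      if (st.2.1.zip st.2.2).any
          (fun pq => (m == pq.1 && i == pq.2) || (i == pq.1 && m == pq.2)) then 1 else 0
    if flag ≠ 1 then (st.1 + 1, st.2.1 ++ [m], st.2.2 ++ [i]) else st
  else st

def calc_py (case : List Int) : Int :=
  let a := (PySem.List.pyGet? case 0).getD 0
  let b := (PySem.List.pyGet? case 1).getD 0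
  ((PySem.List.pyRange a (b + 1) 1).foldl
      (fun st i =>
        let num := PySem.Int.toChars i
        let l : Int := (num.length : Int) - 1
        (PySem.List.pyRange l 0 (-1)).foldl (pvStepA a b i num) st)
      (0, [], [])).1

-- ===== PORT B =====
def calc_py_alt (case : List Int) : Int :=
  let a := (PySem.List.pyGet? case 0).getD 0
  let b := (PySem.List.pyGet? case 1).getD 0
  let pairs :=
    (PySem.List.pyRange a (b + 1) 1).foldl
      (fun acc i =>
        let s := PySem.Int.toChars i
        (PySem.List.pyRange 1 ((s.length : Int)) 1).foldl
          (fun acc2 j =>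
            let v := (PySem.Int.ofChars? (PySem.List.slice s (some j) none ++
                       PySem.List.slice s none (some j))).getD 0
            if i < v ∧ v ≤ b then acc2 ++ [(i, v)] else acc2)
          acc)
      []
  let sp := PySem.List.sorted2 pairs (fun p => p.1) (fun p => p.2)
  PySem.List.len sp -
    ((sp.zip (PySem.List.slice sp (some 1) none)).countP (fun xy => xy.1 == xy.2) : Int)

-- ===== PRECONDITION & SPEC =====
-- Pre_ excludes exactly the inputs on which Python's calc raises: fewer than two elements
-- (IndexError on case[1]), or a nonempty range that starts below 0 (int() raises ValueError
-- on a rotated digit string of a negative number).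
def Pre_calc_py (case : List Int) : Prop :=
  2 ≤ case.length ∧ (case.getD 0 0 ≤ case.getD 1 0 → 0 ≤ case.getD 0 0)
instance (case : List Int) : Decidable (Pre_calc_py case) := by unfold Pre_calc_py; infer_instance
def pvWitness_calc_py : List Int := ([10, 50] : List Int)

def Spec_calc_py (case : List Int) (out : Int) : Prop := out = calc_py_alt case
instance (case : List Int) (out : Int) : Decidable (Spec_calc_py case out) := by
  unfold Spec_calc_py; infer_instance

-- ===== CLAIM (what is proved, stated in full; the proofs are below) =====
def Claim_equal_calc_py : Prop :=
  ∀ (case : List Int), Dom_calc_py case → Pre_calc_py case → Spec_calc_py case (calc_py case)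

-- ===== LEMMAS AND PROOFS =====

-- the integer value of the j-rotation of a digit string (the shared subexpression of both ports)
def pvRot (cs : List Char) (j : Int) : Int :=
  (PySem.Int.ofChars? (PySem.List.slice cs (some j) none ++
    PySem.List.slice cs none (some j))).getD 0

-- one iteration of the per-number set loop (the intermediate form both ports are reduced to)
def pvStepB (b i : Int) (cs : List Char) (ms : PySem.Set Int) (j : Int) : PySem.Set Int :=
  let m := pvRot cs j
  if i < m ∧ m ≤ b then PySem.Set.add ms m else ms

-- intermediate form: sum over i of the number of distinct qualifying rotations of i
def pvSumSets (case : List Int) : Int :=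
  let a := (PySem.List.pyGet? case 0).getD 0
  let b := (PySem.List.pyGet? case 1).getD 0
  (PySem.List.pyRange a (b + 1) 1).foldl
    (fun total i =>
      let s := PySem.Int.toChars i
      let mates := (PySem.List.pyRange 1 ((s.length : Int)) 1).foldl (pvStepB b i s)
        PySem.Set.empty
      total + PySem.Set.len mates)
    0

lemma pvStepB_eq (b i : Int) (cs : List Char) (ms : PySem.Set Int) (j : Int) :
    pvStepB b i cs ms j =
      if i < pvRot cs j ∧ pvRot cs j ≤ b then PySem.Set.add ms (pvRot cs j) else ms := rfl

lemma pvMem_foldB (b i : Int) (cs : List Char) :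
    ∀ (js : List Int) (ms : PySem.Set Int) (x : Int),
      x ∈ js.foldl (pvStepB b i cs) ms ↔
        x ∈ ms ∨ ∃ j ∈ js, (i < pvRot cs j ∧ pvRot cs j ≤ b) ∧ pvRot cs j = x := by
  intro js
  induction js with
  | nil => simp
  | cons j js ih =>
    intro ms x
    rw [List.foldl_cons, pvStepB_eq, ih]
    by_cases hg : i < pvRot cs j ∧ pvRot cs j ≤ b
    · simp only [if_pos hg, PySem.Set.mem_add, List.mem_cons]
      constructor
      · rintro ((h | rfl) | h)
        · exact Or.inl h
        · exact Or.inr ⟨j, Or.inl rfl, hg, rfl⟩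
        · obtain ⟨j', hj', hcond⟩ := h
          exact Or.inr ⟨j', Or.inr hj', hcond⟩
      · rintro (h | ⟨j', (rfl | hj'), hcond⟩)
        · exact Or.inl (Or.inl h)
        · exact Or.inl (Or.inr hcond.2.symm)
        · exact Or.inr ⟨j', hj', hcond⟩
    · simp only [if_neg hg, List.mem_cons]
      constructor
      · rintro (h | h)
        · exact Or.inl h
        · obtain ⟨j', hj', hcond⟩ := h
          exact Or.inr ⟨j', Or.inr hj', hcond⟩
      · rintro (h | ⟨j', (rfl | hj'), hcond⟩)
        · exact Or.inl h
        · exact absurd hcond.1 hg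
        · exact Or.inr ⟨j', hj', hcond⟩

lemma pvNodup_foldB (b i : Int) (cs : List Char) :
    ∀ (js : List Int) (ms : PySem.Set Int), ms.Nodup →
      (js.foldl (pvStepB b i cs) ms).Nodup := by
  intro js
  induction js with
  | nil => intro ms h; simpa using h
  | cons j js ih =>
    intro ms h
    rw [List.foldl_cons, pvStepB_eq]
    split
    · exact ih _ (PySem.Set.nodup_add ms _ h)
    · exact ih _ h

lemma pvGt_foldB (b i : Int) (cs : List Char) (js : List Int) (ms : PySem.Set Int)
    (h : ∀ x ∈ ms, i < x) : ∀ x ∈ js.foldl (pvStepB b i cs) ms, i < x := by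
  intro x hx
  rcases (pvMem_foldB b i cs js ms x).mp hx with h' | ⟨j, _, hcond, rfl⟩
  · exact h x h'
  · exact hcond.1

lemma pvLen_foldB_reverse (b i : Int) (cs : List Char) (js : List Int) :
    ((js.reverse).foldl (pvStepB b i cs) []).length =
      (js.foldl (pvStepB b i cs) []).length := by
  have h1 : ((js.reverse).foldl (pvStepB b i cs) []).Nodup :=
    pvNodup_foldB b i cs _ [] List.nodup_nil
  have h2 : (js.foldl (pvStepB b i cs) []).Nodup :=
    pvNodup_foldB b i cs _ [] List.nodup_nil
  refine List.Perm.length_eq ?_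
  rw [List.perm_ext_iff_of_nodup h1 h2]
  intro x
  rw [pvMem_foldB, pvMem_foldB]
  simp [List.mem_reverse]

lemma pvZip_self_map {α β : Type} (k : α → β) :
    ∀ ms : List α, ms.zip (ms.map k) = ms.map (fun x => (x, k x)) := by
  intro ms; induction ms with
  | nil => simp
  | cons y ys ih => simp [ih]

lemma pvStepA_eq (a b i : Int) (cs : List Char) (st : Int × List Int × List Int) (j : Int) :
    pvStepA a b i cs st j =
      if pvRot cs j ≤ b ∧ i < pvRot cs j ∧ a ≤ pvRot cs j then
        if (st.2.1.zip st.2.2).any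
            (fun pq => (pvRot cs j == pq.1 && i == pq.2) || (i == pq.1 && pvRot cs j == pq.2)) then st
        else (st.1 + 1, st.2.1 ++ [pvRot cs j], st.2.2 ++ [i])
      else st := by
  unfold pvStepA pvRot
  by_cases h : (st.2.1.zip st.2.2).any
      (fun pq => ((PySem.Int.ofChars? (PySem.List.slice cs (some j) none ++
        PySem.List.slice cs none (some j))).getD 0 == pq.1 && i == pq.2) ||
        (i == pq.1 && (PySem.Int.ofChars? (PySem.List.slice cs (some j) none ++
        PySem.List.slice cs none (some j))).getD 0 == pq.2)) = true
  · simp [h]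
  · simp [h]

lemma pvInner (a b i : Int) (cs : List Char) (hai : a ≤ i) :
    ∀ (js : List Int) (c : Int) (la0 lb0 ms : List Int),
      la0.length = lb0.length →
      (∀ pq ∈ la0.zip lb0, pq.2 < i ∧ pq.2 < pq.1) →
      (∀ x ∈ ms, i < x) →
      js.foldl (pvStepA a b i cs) (c, la0 ++ ms, lb0 ++ ms.map (fun _ => i)) =
        (c + (((js.foldl (pvStepB b i cs) ms).length : Int) - (ms.length : Int)),
          la0 ++ js.foldl (pvStepB b i cs) ms,
          lb0 ++ (js.foldl (pvStepB b i cs) ms).map (fun _ => i)) := by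
  intro js
  induction js with
  | nil => intro c la0 lb0 ms _ _ _; simp
  | cons j js ih =>
    intro c la0 lb0 ms hlen hold hms
    rw [List.foldl_cons, List.foldl_cons, pvStepB_eq, pvStepA_eq]
    by_cases hg : i < pvRot cs j ∧ pvRot cs j ≤ b
    · have hguard : pvRot cs j ≤ b ∧ i < pvRot cs j ∧ a ≤ pvRot cs j :=
        ⟨hg.2, hg.1, le_trans hai (le_of_lt hg.1)⟩
      rw [if_pos hguard, if_pos hg]
      have hany : ((c, la0 ++ ms, lb0 ++ ms.map (fun _ => i)).2.1.zip
            (c, la0 ++ ms, lb0 ++ ms.map (fun _ => i)).2.2).any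
          (fun pq => (pvRot cs j == pq.1 && i == pq.2) || (i == pq.1 && pvRot cs j == pq.2))
          = decide (pvRot cs j ∈ ms) := by
        show ((la0 ++ ms).zip (lb0 ++ ms.map (fun _ => i))).any _ = _
        rw [List.zip_append hlen, List.any_append, pvZip_self_map, List.any_map]
        have hold_false : (la0.zip lb0).any
            (fun pq => (pvRot cs j == pq.1 && i == pq.2) || (i == pq.1 && pvRot cs j == pq.2))
            = false := by
          rw [List.any_eq_false]
          intro pq hpq
          have h2 := hold pq hpq
          simp only [Bool.or_eq_true, Bool.and_eq_true, beq_iff_eq, not_or, not_and]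
          omega
        rw [hold_false, Bool.false_or]
        by_cases hm : pvRot cs j ∈ ms
        · simp only [hm, decide_true]
          rw [List.any_eq_true]
          exact ⟨pvRot cs j, hm, by simp⟩
        · simp only [hm, decide_false]
          rw [List.any_eq_false]
          intro x hx
          have hix := hms x hx
          have hne : pvRot cs j ≠ x := fun h => hm (h ▸ hx)
          simp only [Function.comp_apply, Bool.or_eq_true, Bool.and_eq_true, beq_iff_eq,
            not_or, not_and]
          omega
      rw [hany]
      by_cases hm : pvRot cs j ∈ ms
      · rw [if_pos (by simpa using hm), PySem.Set.add_of_mem hm]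
        exact ih c la0 lb0 ms hlen hold hms
      · rw [if_neg (by simpa using hm), PySem.Set.add_of_not_mem hm]
        have hms' : ∀ x ∈ ms ++ [pvRot cs j], i < x := by
          intro x hx
          rcases List.mem_append.mp hx with h | h
          · exact hms x h
          · rcases List.mem_singleton.mp h with rfl
            exact hg.1
        have hstep := ih (c + 1) la0 lb0 (ms ++ [pvRot cs j]) hlen hold hms'
        have hshape : ((c, la0 ++ ms, lb0 ++ ms.map (fun _ => i)).1 + 1,
              (c, la0 ++ ms, lb0 ++ ms.map (fun _ => i)).2.1 ++ [pvRot cs j],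
              (c, la0 ++ ms, lb0 ++ ms.map (fun _ => i)).2.2 ++ [i])
            = (c + 1, la0 ++ (ms ++ [pvRot cs j]),
                lb0 ++ (ms ++ [pvRot cs j]).map (fun _ => i)) := by
          simp
        rw [hshape, hstep]
        have hlen1 : (((ms ++ [pvRot cs j]).length : Int)) = (ms.length : Int) + 1 := by
          simp
        refine Prod.ext ?_ rfl
        simp only [hlen1]
        ring
    · have hng : ¬(pvRot cs j ≤ b ∧ i < pvRot cs j ∧ a ≤ pvRot cs j) :=
        fun h => hg ⟨h.2.1, h.1⟩
      rw [if_neg hng, if_neg hg]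
      exact ih c la0 lb0 ms hlen hold hms

lemma pvOuter (a b : Int) :
    ∀ (n : Nat) (cur c : Int) (la lb : List Int),
      (b + 1 - cur).toNat = n → a ≤ cur → la.length = lb.length →
      (∀ pq ∈ la.zip lb, pq.2 < cur ∧ pq.2 < pq.1) →
      ((PySem.List.pyRange cur (b + 1) 1).foldl
          (fun st i =>
            let num := PySem.Int.toChars i
            let l : Int := (num.length : Int) - 1
            (PySem.List.pyRange l 0 (-1)).foldl (pvStepA a b i num) st)
          (c, la, lb)).1
        = (PySem.List.pyRange cur (b + 1) 1).foldl
            (fun total i =>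
              let s := PySem.Int.toChars i
              let mates := (PySem.List.pyRange 1 ((s.length : Int)) 1).foldl (pvStepB b i s)
                PySem.Set.empty
              total + PySem.Set.len mates)
            c := by
  intro n
  induction n with
  | zero =>
    intro cur c la lb hn _ _ _
    rw [PySem.List.pyRange_one_eq_nil (by omega : b + 1 ≤ cur)]
    rfl
  | succ n ih =>
    intro cur c la lb hn hac hlen hold
    have hcb : cur < b + 1 := by omega
    rw [PySem.List.pyRange_one_cons hcb, List.foldl_cons, List.foldl_cons]
    have hinner := pvInner a b cur (PySem.Int.toChars cur) hac
      (PySem.List.pyRange (((PySem.Int.toChars cur).length : Int) - 1) 0 (-1))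
      c la lb [] hlen hold (by simp)
    simp only [List.append_nil, List.map_nil, List.length_nil, Nat.cast_zero, sub_zero]
      at hinner
    rw [hinner]
    -- the per-number count of A (descending j) equals the size of the set (ascending j)
    have hrev : PySem.List.pyRange (((PySem.Int.toChars cur).length : Int) - 1) 0 (-1)
        = (PySem.List.pyRange 1 ((PySem.Int.toChars cur).length : Int) 1).reverse := by
      rw [PySem.List.pyRange_neg_one_eq_reverse]
      norm_num
    have hcnt : (((PySem.List.pyRange (((PySem.Int.toChars cur).length : Int) - 1) 0
          (-1)).foldl (pvStepB b cur (PySem.Int.toChars cur)) []).length : Int)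
        = PySem.Set.len ((PySem.List.pyRange 1 ((PySem.Int.toChars cur).length : Int)
            1).foldl (pvStepB b cur (PySem.Int.toChars cur)) PySem.Set.empty) := by
      rw [hrev]
      have := pvLen_foldB_reverse b cur (PySem.Int.toChars cur)
        (PySem.List.pyRange 1 ((PySem.Int.toChars cur).length : Int) 1)
      show (((PySem.List.pyRange 1 ((PySem.Int.toChars cur).length : Int)
          1).reverse.foldl (pvStepB b cur (PySem.Int.toChars cur)) []).length : Int) = _
      rw [this]
      rfl
    rw [hcnt]
    set msD := (PySem.List.pyRange (((PySem.Int.toChars cur).length : Int) - 1) 0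
      (-1)).foldl (pvStepB b cur (PySem.Int.toChars cur)) [] with hmsD
    apply ih (cur + 1)
    · omega
    · omega
    · simp [hlen]
    · intro pq hpq
      rw [List.zip_append hlen, pvZip_self_map] at hpq
      rcases List.mem_append.mp hpq with h | h
      · have := hold pq h
        constructor <;> omega
      · rcases List.mem_map.mp h with ⟨x, hx, rfl⟩
        have hgt : cur < x := pvGt_foldB b cur (PySem.Int.toChars cur) _ [] (by simp) x hx
        constructor <;> [omega; exact hgt]

-- A's port equals the intermediate per-number-set sum
lemma pvA_eq_sum (case : List Int) : calc_py case = pvSumSets case := by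
  unfold calc_py pvSumSets
  exact pvOuter _ _ _ _ 0 [] [] rfl le_rfl rfl (by simp)

-- ========== B side ==========

-- the qualifying (i, rotation value) pairs contributed by the number i
def pvBlock (b i : Int) : List (Int × Int) :=
  ((PySem.List.pyRange 1 (((PySem.Int.toChars i).length : Int)) 1).filter
      (fun j => decide (i < pvRot (PySem.Int.toChars i) j ∧ pvRot (PySem.Int.toChars i) j ≤ b))).map
    (fun j => (i, pvRot (PySem.Int.toChars i) j))

-- Python's tuple comparison on (Int, Int): the strict lexicographic test used by sorted2
def pvBefore (x y : Int × Int) : Bool :=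
  decide (x.1 < y.1) || (!decide (y.1 < x.1) && decide (x.2 < y.2))

def pvLexLe (x y : Int × Int) : Prop := x.1 < y.1 ∨ (x.1 = y.1 ∧ x.2 ≤ y.2)

lemma pvBefore_trans (x y z : Int × Int) (h1 : pvBefore x y = true) (h2 : pvBefore y z = true) :
    pvBefore x z = true := by
  simp only [pvBefore, Bool.or_eq_true, Bool.and_eq_true, Bool.not_eq_true',
    decide_eq_true_eq, decide_eq_false_iff_not] at *
  omega

lemma pvLexLe_of_not_before (x y : Int × Int) (h : pvBefore y x = false) : pvLexLe x y := by
  simp only [pvBefore, Bool.or_eq_false_iff, Bool.and_eq_false_iff, Bool.not_eq_false',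
    decide_eq_true_eq, decide_eq_false_iff_not] at h
  unfold pvLexLe
  omega

lemma pvInsertBy_nil (x : Int × Int) : PySem.List.insertBy pvBefore x [] = [x] := rfl

lemma pvInsertBy_cons (x y : Int × Int) (ys : List (Int × Int)) :
    PySem.List.insertBy pvBefore x (y :: ys) =
      if pvBefore x y then x :: y :: ys else y :: PySem.List.insertBy pvBefore x ys := rfl

lemma pvBefore_asym (x y : Int × Int) (h : pvBefore x y = true) : pvBefore y x = false := by
  simp only [pvBefore, Bool.or_eq_true, Bool.and_eq_true, Bool.not_eq_true',
    decide_eq_true_eq, decide_eq_false_iff_not, Bool.or_eq_false_iff, Bool.and_eq_false_iff,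
    Bool.not_eq_false'] at *
  omega

lemma pvPairwise_insertBy (x : Int × Int) (ys : List (Int × Int))
    (h : ys.Pairwise (fun a b => pvBefore b a = false)) :
    (PySem.List.insertBy pvBefore x ys).Pairwise (fun a b => pvBefore b a = false) := by
  induction ys with
  | nil => simp [pvInsertBy_nil]
  | cons y t ih =>
    rw [pvInsertBy_cons]
    rcases List.pairwise_cons.mp h with ⟨hy, ht⟩
    by_cases hb : pvBefore x y = true
    · rw [if_pos hb]
      refine List.pairwise_cons.mpr ⟨?_, h⟩
      intro z hz
      rcases List.mem_cons.mp hz with rfl | hz'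
      · exact pvBefore_asym x z hb
      · cases hzx : pvBefore z x with
        | false => rfl
        | true =>
          have := pvBefore_trans z x y hzx hb
          rw [hy z hz'] at this
          exact absurd this (by simp)
    · rw [if_neg hb]
      refine List.pairwise_cons.mpr ⟨?_, ih ht⟩
      intro z hz
      rcases (PySem.List.mem_insertBy pvBefore x z t).mp hz with rfl | hz'
      · simpa using hb
      · exact hy z hz'

lemma pvSorted_pairwise (xs : List (Int × Int)) :
    ∀ acc, acc.Pairwise (fun a b => pvBefore b a = false) →
      (xs.foldl (fun acc x => PySem.List.insertBy pvBefore x acc) acc).Pairwise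
        (fun a b => pvBefore b a = false) := by
  induction xs with
  | nil => intro acc h; exact h
  | cons x t ih => intro acc h; exact ih _ (pvPairwise_insertBy x acc h)

lemma pvSorted2_eq (xs : List (Int × Int)) :
    PySem.List.sorted2 xs (fun p => p.1) (fun p => p.2) =
      xs.foldl (fun acc x => PySem.List.insertBy pvBefore x acc) [] := rfl

lemma pvLexLe_antisymm (x y : Int × Int) (h1 : pvLexLe x y) (h2 : pvLexLe y x) : x = y := by
  unfold pvLexLe at *
  have : x.1 = y.1 ∧ x.2 = y.2 := by omega
  exact Prod.ext this.1 this.2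

lemma pvLen_discard {α : Type} [BEq α] [LawfulBEq α] (s : List α) (hs : s.Nodup) (x : α) :
    (PySem.Set.discard s x).length = s.length - (if x ∈ s then 1 else 0) := by
  induction s with
  | nil => simp [PySem.Set.discard]
  | cons z t ih =>
    rcases List.nodup_cons.mp hs with ⟨hz, ht⟩
    have ih2 := ih ht
    by_cases hzx : z = x
    · have hnot : x ∉ t := hzx ▸ hz
      have hfil : List.filter (fun y => !y == x) t = t := by
        apply List.filter_eq_self.mpr
        intro y hy
        have : ¬ (y = x) := fun hc => hnot (hc ▸ hy)
        simp [this]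
      simp [PySem.Set.discard, hzx, hfil]
    · have hne : ¬ (x = z) := fun h => hzx h.symm
      have hb : (!(z == x)) = true := by simp [hzx]
      simp only [PySem.Set.discard, List.filter_cons, hb, if_true, List.length_cons]
      simp only [PySem.Set.discard] at ih2
      rw [ih2]
      simp only [List.mem_cons, hne, false_or]
      by_cases hmem : x ∈ t
      · have : 1 ≤ t.length := List.length_pos_of_mem hmem
        simp only [hmem, if_true]
        omega
      · simp [hmem]

-- number of distinct elements of a lex-sorted pair list = length minus equal-adjacent count
lemma pvRuns (M : List (Int × Int)) (h : M.Pairwise pvLexLe) :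
    M.length = (PySem.Set.ofList M).length +
      ((M.zip (M.drop 1)).countP (fun xy => xy.1 == xy.2)) := by
  induction M with
  | nil => simp [PySem.Set.ofList]
  | cons x T ih =>
    rcases List.pairwise_cons.mp h with ⟨hx, hT⟩
    have ihT := ih hT
    cases T with
    | nil => simp [PySem.Set.ofList]
    | cons y T' =>
      have hzip : ((x :: y :: T').zip ((x :: y :: T').drop 1)) =
          (x, y) :: ((y :: T').zip ((y :: T').drop 1)) := by
        simp [List.zip]
      rw [hzip, List.countP_cons, PySem.Set.ofList_cons]
      have hnd : (PySem.Set.ofList (y :: T')).Nodup := PySem.Set.nodup_ofList _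
      have hdisc := pvLen_discard (PySem.Set.ofList (y :: T')) hnd x
      by_cases hxy : x = y
      · have hmem : x ∈ PySem.Set.ofList (y :: T') := by
          rw [PySem.Set.mem_ofList]; exact hxy ▸ List.mem_cons_self
        have hpos : 1 ≤ (PySem.Set.ofList (y :: T')).length := List.length_pos_of_mem hmem
        have hbeq : ((x, y).1 == (x, y).2) = true := by simp [hxy]
        rw [hbeq, if_pos hmem] at *
        simp only [List.length_cons, if_true] at ihT ⊢
        omega
      · have hmem : x ∉ PySem.Set.ofList (y :: T') := by
          rw [PySem.Set.mem_ofList]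
          intro hc
          rcases List.mem_cons.mp hc with rfl | hc'
          · exact hxy rfl
          · have h1 : pvLexLe x y := hx y List.mem_cons_self
            have h2 : pvLexLe y x := (List.pairwise_cons.mp hT).1 x hc'
            exact hxy (pvLexLe_antisymm x y h1 h2)
        have hbeq : ((x, y).1 == (x, y).2) = false := by simp [hxy]
        rw [hbeq, if_neg hmem] at *
        simp only [List.length_cons, Bool.false_eq_true, if_false] at ihT ⊢
        omega

lemma pvBlock_fst (b i : Int) : ∀ p ∈ pvBlock b i, p.1 = i := by
  intro p hp
  rcases List.mem_map.mp hp with ⟨j, _, rfl⟩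
  rfl

lemma pvOfList_map_inj {α β : Type} [BEq α] [LawfulBEq α] [BEq β] [LawfulBEq β] (f : α → β)
    (hf : Function.Injective f) (l : List α) :
    PySem.Set.ofList (l.map f) = (PySem.Set.ofList l).map f := by
  induction l with
  | nil => rfl
  | cons x t ih =>
    rw [List.map_cons, PySem.Set.ofList_cons, PySem.Set.ofList_cons, List.map_cons, ih]
    congr 1
    show List.filter _ _ = List.map f (List.filter _ _)
    rw [List.filter_map]
    apply congrArg (List.map f)
    apply List.filter_congr
    intro y hy
    simp [Function.comp, hf.eq_iff]

lemma pvLen_ofList_perm {α : Type} [BEq α] [LawfulBEq α] (xs ys : List α) (h : xs.Perm ys) :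
    (PySem.Set.ofList xs).length = (PySem.Set.ofList ys).length := by
  refine List.Perm.length_eq ?_
  rw [List.perm_ext_iff_of_nodup (PySem.Set.nodup_ofList xs) (PySem.Set.nodup_ofList ys)]
  intro x
  rw [PySem.Set.mem_ofList, PySem.Set.mem_ofList]
  exact h.mem_iff

lemma pvMates_eq (b i : Int) :
    (PySem.List.pyRange 1 (((PySem.Int.toChars i).length : Int)) 1).foldl
        (pvStepB b i (PySem.Int.toChars i)) PySem.Set.empty
      = PySem.Set.ofList
          (((PySem.List.pyRange 1 (((PySem.Int.toChars i).length : Int)) 1).filter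
              (fun j => decide (i < pvRot (PySem.Int.toChars i) j ∧
                pvRot (PySem.Int.toChars i) j ≤ b))).map
            (pvRot (PySem.Int.toChars i))) := by
  have h1 : pvStepB b i (PySem.Int.toChars i) = fun ms j =>
      if i < pvRot (PySem.Int.toChars i) j ∧ pvRot (PySem.Int.toChars i) j ≤ b then
        PySem.Set.add ms (pvRot (PySem.Int.toChars i) j) else ms := rfl
  rw [h1, PySem.List.foldl_ite_eq_foldl_filter
        (p := fun j => i < pvRot (PySem.Int.toChars i) j ∧ pvRot (PySem.Int.toChars i) j ≤ b)
        (f := fun ms j => PySem.Set.add ms (pvRot (PySem.Int.toChars i) j)),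
      ← PySem.Set.update_map_eq_foldl_add, PySem.Set.update_empty]

-- the distinct pairs of a block are in bijection with the distinct rotation values
lemma pvBlock_len (b i : Int) :
    (PySem.Set.ofList (pvBlock b i)).length =
      (PySem.Set.ofList
        (((PySem.List.pyRange 1 (((PySem.Int.toChars i).length : Int)) 1).filter
            (fun j => decide (i < pvRot (PySem.Int.toChars i) j ∧
              pvRot (PySem.Int.toChars i) j ≤ b))).map
          (pvRot (PySem.Int.toChars i)))).length := by
  unfold pvBlock
  have hmm : (((PySem.List.pyRange 1 (((PySem.Int.toChars i).length : Int)) 1).filter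
        (fun j => decide (i < pvRot (PySem.Int.toChars i) j ∧
          pvRot (PySem.Int.toChars i) j ≤ b))).map
      (fun j => (i, pvRot (PySem.Int.toChars i) j)))
      = (((PySem.List.pyRange 1 (((PySem.Int.toChars i).length : Int)) 1).filter
          (fun j => decide (i < pvRot (PySem.Int.toChars i) j ∧
            pvRot (PySem.Int.toChars i) j ≤ b))).map
        (pvRot (PySem.Int.toChars i))).map (fun v => (i, v)) := by
    rw [List.map_map]
    rfl
  rw [hmm, pvOfList_map_inj (fun v => (i, v)) (fun u v h => (Prod.mk.injEq _ _ _ _).mp h |>.2),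
    List.length_map]

-- sum over blocks with distinct tags
lemma pvFlat (b : Int) : ∀ (n : Nat) (cur : Int), (b + 1 - cur).toNat = n →
    ((PySem.Set.ofList ((PySem.List.pyRange cur (b + 1) 1).flatMap (pvBlock b))).length : Int)
      = ((PySem.List.pyRange cur (b + 1) 1).map
          (fun i => ((PySem.Set.ofList (pvBlock b i)).length : Int))).sum := by
  intro n
  induction n with
  | zero =>
    intro cur hn
    rw [PySem.List.pyRange_one_eq_nil (by omega : b + 1 ≤ cur)]
    rfl
  | succ n ih =>
    intro cur hn
    have hcb : cur < b + 1 := by omega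
    rw [PySem.List.pyRange_one_cons hcb, List.flatMap_cons, List.map_cons, List.sum_cons,
      PySem.Set.ofList_append, PySem.Set.update_eq_append_filter]
    have hfil : List.filter (fun y => !(PySem.Set.ofList (pvBlock b cur)).contains y)
        (PySem.Set.ofList ((PySem.List.pyRange (cur + 1) (b + 1) 1).flatMap (pvBlock b)))
        = PySem.Set.ofList ((PySem.List.pyRange (cur + 1) (b + 1) 1).flatMap (pvBlock b)) := by
      apply List.filter_eq_self.mpr
      intro y hy
      rw [PySem.Set.mem_ofList] at hy
      rcases List.mem_flatMap.mp hy with ⟨i, hi, hyi⟩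
      have h1 : y.1 = i := pvBlock_fst b i y hyi
      have h2 : cur + 1 ≤ i := (PySem.List.mem_pyRange_one.mp hi).1
      have hnc : ¬ (y ∈ PySem.Set.ofList (pvBlock b cur)) := by
        rw [PySem.Set.mem_ofList]
        intro hc
        have := pvBlock_fst b cur y hc
        omega
      simp [hnc]
    rw [hfil, List.length_append]
    push_cast
    rw [ih (cur + 1) (by omega)]

-- B's port equals the intermediate per-number-set sum
lemma pvB_eq_sum (case : List Int) : calc_py_alt case = pvSumSets case := by
  unfold calc_py_alt pvSumSets
  set a := (PySem.List.pyGet? case 0).getD 0 with ha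
  set b := (PySem.List.pyGet? case 1).getD 0 with hb
  simp only []
  -- step 1: the generation loop builds the flat list of blocks
  have hinner : ∀ (i : Int) (acc : List (Int × Int)),
      (PySem.List.pyRange 1 (((PySem.Int.toChars i).length : Int)) 1).foldl
        (fun acc2 j =>
          let v := (PySem.Int.ofChars? (PySem.List.slice (PySem.Int.toChars i) (some j) none ++
                     PySem.List.slice (PySem.Int.toChars i) none (some j))).getD 0
          if i < v ∧ v ≤ b then acc2 ++ [(i, v)] else acc2)
        acc = acc ++ pvBlock b i := by
    intro i acc
    exact PySem.List.foldl_append_ite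
      (fun j => i < pvRot (PySem.Int.toChars i) j ∧ pvRot (PySem.Int.toChars i) j ≤ b)
      (fun j => (i, pvRot (PySem.Int.toChars i) j)) _ acc
  have hpairs : (PySem.List.pyRange a (b + 1) 1).foldl
      (fun acc i =>
        let s := PySem.Int.toChars i
        (PySem.List.pyRange 1 ((s.length : Int)) 1).foldl
          (fun acc2 j =>
            let v := (PySem.Int.ofChars? (PySem.List.slice s (some j) none ++
                       PySem.List.slice s none (some j))).getD 0
            if i < v ∧ v ≤ b then acc2 ++ [(i, v)] else acc2)
          acc)
      [] = (PySem.List.pyRange a (b + 1) 1).flatMap (pvBlock b) := by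
    have hcongr : (PySem.List.pyRange a (b + 1) 1).foldl
        (fun acc i =>
          let s := PySem.Int.toChars i
          (PySem.List.pyRange 1 ((s.length : Int)) 1).foldl
            (fun acc2 j =>
              let v := (PySem.Int.ofChars? (PySem.List.slice s (some j) none ++
                         PySem.List.slice s none (some j))).getD 0
              if i < v ∧ v ≤ b then acc2 ++ [(i, v)] else acc2)
            acc)
        [] = (PySem.List.pyRange a (b + 1) 1).foldl
          (fun acc i => acc ++ pvBlock b i) [] := by
      apply PySem.List.foldl_congr_mem
      intro acc i _
      exact hinner i acc
    rw [hcongr, PySem.List.foldl_append_eq_flatMap, List.nil_append]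
  rw [hpairs]
  -- step 2: the counting stage computes the number of distinct pairs
  set pairs := (PySem.List.pyRange a (b + 1) 1).flatMap (pvBlock b) with hpairsdef
  set sp := PySem.List.sorted2 pairs (fun p => p.1) (fun p => p.2) with hsp
  have hslice : PySem.List.slice sp (some 1) none = sp.drop 1 := by
    rw [PySem.List.slice_from sp (by norm_num : (0:Int) ≤ 1)]
    rfl
  have hsorted : sp.Pairwise pvLexLe := by
    rw [hsp, pvSorted2_eq]
    exact (pvSorted_pairwise pairs [] (by simp)).imp
      (fun hab => pvLexLe_of_not_before _ _ hab)
  have hruns := pvRuns sp hsorted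
  have hperm : sp.Perm pairs := PySem.List.sorted2_perm pairs _ _ false
  have hlen : (PySem.Set.ofList sp).length = (PySem.Set.ofList pairs).length :=
    pvLen_ofList_perm sp pairs hperm
  have hcount : PySem.List.len sp -
      ((sp.zip (PySem.List.slice sp (some 1) none)).countP (fun xy => xy.1 == xy.2) : Int)
      = ((PySem.Set.ofList pairs).length : Int) := by
    rw [hslice, PySem.List.len_eq]
    omega
  rw [hcount, hpairsdef, pvFlat b ((b + 1 - a).toNat) a rfl]
  -- step 3: per block, the distinct pairs are the distinct qualifying rotations
  have hfold : (PySem.List.pyRange a (b + 1) 1).foldl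
      (fun total i =>
        let s := PySem.Int.toChars i
        let mates := (PySem.List.pyRange 1 ((s.length : Int)) 1).foldl (pvStepB b i s)
          PySem.Set.empty
        total + PySem.Set.len mates)
      0 = 0 + ((PySem.List.pyRange a (b + 1) 1).map
        (fun i => PySem.Set.len ((PySem.List.pyRange 1 (((PySem.Int.toChars i).length : Int))
          1).foldl (pvStepB b i (PySem.Int.toChars i)) PySem.Set.empty))).sum :=
    PySem.List.foldl_add _ _ 0
  rw [hfold]
  rw [zero_add]
  refine congrArg List.sum (List.map_congr_left ?_)
  intro i _
  rw [pvMates_eq b i]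
  show ((PySem.Set.ofList (pvBlock b i)).length : Int) = _
  rw [pvBlock_len b i]
  rfl

-- ===== VERDICT (by name: the statement is the Claim_ definition above) =====
theorem calc_py_spec : Claim_equal_calc_py := by
  intro case _hdom _hpre
  unfold Spec_calc_py
  rw [pvA_eq_sum, pvB_eq_sum]
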